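-- pv_equiv track=rewrite | github.com/gleb-gavrilov/names-info | names_info.py | get_children_info_by_dict
-- ===== SOURCE A (Python) =====
-- def get_children_info_by_dict(children):
--     children_data = {}
--     for child in children:
--         year = str(child['Year'])
--         if year == '2022':
--             continue
--         try:
--             children_data[year] += child['NumberOfPersons']
--         except KeyError:
--             children_data[year] = child['NumberOfPersons']
--     return children_data
-- ===== SOURCE B (Python) =====
-- def get_children_info_by_dict(children):
--     # Two-pass: collect the distinct non-2022 year keys in first-appearance
--     # order, then sum NumberOfPersons per key with a scan over the records.
--     years = []
--     for child in children:
--         y = str(child['Year'])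
--         if y != '2022' and y not in years:
--             years.append(y)
--     return {y: sum(c['NumberOfPersons'] for c in children if str(c['Year']) == y)
--             for y in years}
-- ===== Notes on version B (the rewrite author's own statement) =====
-- stated objective: alternative
-- what changed: Replaces A's single-pass try/except dict accumulation with a two-pass decomposition: first collect the distinct non-2022 year keys in first-appearance order, then compute each key's total by a per-key sum over the records.
import Mathlib
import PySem

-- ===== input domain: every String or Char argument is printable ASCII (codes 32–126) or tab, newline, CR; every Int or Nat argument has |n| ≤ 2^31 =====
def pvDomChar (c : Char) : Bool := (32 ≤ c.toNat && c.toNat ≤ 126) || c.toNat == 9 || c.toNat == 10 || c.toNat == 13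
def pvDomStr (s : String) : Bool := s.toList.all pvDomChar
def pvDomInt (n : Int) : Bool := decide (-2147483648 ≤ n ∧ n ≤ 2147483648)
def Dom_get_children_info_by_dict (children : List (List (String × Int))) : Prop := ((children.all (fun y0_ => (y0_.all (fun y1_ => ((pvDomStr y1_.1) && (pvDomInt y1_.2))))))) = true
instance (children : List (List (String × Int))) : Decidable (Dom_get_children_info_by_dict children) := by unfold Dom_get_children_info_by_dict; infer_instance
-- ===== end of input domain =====

-- B replaces A's single-pass try/except dict accumulation by a two-pass scheme
-- (collect distinct non-2022 year keys first, then sum per key); objective: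
-- alternative decomposition, same results, not faster.

-- ===== PORT A =====
-- single pass; the try/except is: lookup, then overwrite-or-append
def pvStepA (acc : PySem.Dict String Int) (child : List (String × Int)) : PySem.Dict String Int :=
  match (PySem.Dict.ofList child).get? "Year" with
  | none => acc                                   -- KeyError: excluded by Pre_
  | some yv =>                                    -- year = str(child['Year']), written out below
    if PySem.Int.toStr yv = "2022" then acc
    else
      match (PySem.Dict.ofList child).get? "NumberOfPersons" with
      | none => acc                               -- KeyError: excluded by Pre_
      | some n =>
        match acc.get? (PySem.Int.toStr yv) with
        | some v => acc.insert (PySem.Int.toStr yv) (v + n)   -- try: children_data[year] += n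
        | none   => acc.insert (PySem.Int.toStr yv) n         -- except KeyError: children_data[year] = n

def get_children_info_by_dict (children : List (List (String × Int))) : List (String × Int) :=
  (children.foldl pvStepA PySem.Dict.empty).items

-- ===== PORT B =====
def pvYearStr (child : List (String × Int)) : Option String :=
  ((PySem.Dict.ofList child).get? "Year").map PySem.Int.toStr

-- first pass of Source B: the distinct non-2022 year strings, first-appearance order
def pvKeys (children : List (List (String × Int))) : List String :=
  children.foldl (fun ks child =>
    match pvYearStr child with
    | none => ks
    | some y => if y ≠ "2022" ∧ y ∉ ks then ks ++ [y] else ks) []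

-- sum(c['NumberOfPersons'] for c in children if str(c['Year']) == y)
def pvSum (children : List (List (String × Int))) (y : String) : Int :=
  children.foldl (fun s c =>
    if pvYearStr c = some y
    then s + ((PySem.Dict.ofList c).get? "NumberOfPersons").getD 0
    else s) 0

def get_children_info_by_dict_alt (children : List (List (String × Int))) : List (String × Int) :=
  (pvKeys children).map (fun y => (y, pvSum children y))

-- ===== PRECONDITION & SPEC =====
-- Pre_ excludes exactly the inputs where A raises KeyError: a record with no
-- 'Year' key, or a non-2022 record with no 'NumberOfPersons' key.
def pvPreChild (child : List (String × Int)) : Bool :=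
  match (PySem.Dict.ofList child).get? "Year" with
  | none => false
  | some yv => PySem.Int.toStr yv == "2022" || ((PySem.Dict.ofList child).get? "NumberOfPersons").isSome

def Pre_get_children_info_by_dict (children : List (List (String × Int))) : Prop :=
  ∀ child ∈ children, pvPreChild child = true
instance (children : List (List (String × Int))) : Decidable (Pre_get_children_info_by_dict children) := by
  unfold Pre_get_children_info_by_dict; infer_instance

def pvWitness_get_children_info_by_dict : (List (List (String × Int))) :=
  [[("Year", 2021), ("NumberOfPersons", 3)],
   [("Year", 2022), ("NumberOfPersons", 5)],
   [("Year", 2021), ("NumberOfPersons", 4)]]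

def Spec_get_children_info_by_dict (children : List (List (String × Int))) (out : List (String × Int)) : Prop := out = get_children_info_by_dict_alt children
instance (children : List (List (String × Int))) (out : List (String × Int)) : Decidable (Spec_get_children_info_by_dict children out) := by unfold Spec_get_children_info_by_dict; infer_instance

-- ===== CLAIM (what is proved, stated in full; the proofs are below) =====
def Claim_equal_get_children_info_by_dict : Prop := ∀ (children : List (List (String × Int))), Dom_get_children_info_by_dict children → Pre_get_children_info_by_dict children → Spec_get_children_info_by_dict children (get_children_info_by_dict children)

-- ===== LEMMAS AND PROOFS =====

theorem pvKeys_append (l : List (List (String × Int))) (c : List (String × Int)) :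
    pvKeys (l ++ [c]) =
      match pvYearStr c with
      | none => pvKeys l
      | some y => if y ≠ "2022" ∧ y ∉ pvKeys l then pvKeys l ++ [y] else pvKeys l := by
  simp [pvKeys, List.foldl_append]

theorem pvSum_append (l : List (List (String × Int))) (c : List (String × Int)) (y : String) :
    pvSum (l ++ [c]) y =
      if pvYearStr c = some y
      then pvSum l y + ((PySem.Dict.ofList c).get? "NumberOfPersons").getD 0
      else pvSum l y := by
  simp [pvSum, List.foldl_append]

-- membership in the key list, for the generalized fold
theorem mem_keysAux (l : List (List (String × Int))) :
    ∀ (ks : List String) (y : String),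
      y ∈ l.foldl (fun ks child =>
        match pvYearStr child with
        | none => ks
        | some y => if y ≠ "2022" ∧ y ∉ ks then ks ++ [y] else ks) ks ↔
      y ∈ ks ∨ (y ≠ "2022" ∧ ∃ c ∈ l, pvYearStr c = some y) := by
  induction l with
  | nil => simp
  | cons c l ih =>
    intro ks y
    simp only [List.foldl_cons, ih]
    cases h : pvYearStr c with
    | none =>
      dsimp only
      constructor
      · rintro (hy | hy)
        · exact Or.inl hy
        · exact Or.inr ⟨hy.1, by obtain ⟨d, hd, hdy⟩ := hy.2; exact ⟨d, List.mem_cons_of_mem _ hd, hdy⟩⟩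
      · rintro (hy | ⟨hne, d, hd, hdy⟩)
        · exact Or.inl hy
        · rcases List.mem_cons.mp hd with rfl | hd
          · rw [h] at hdy; exact absurd hdy (by simp)
          · exact Or.inr ⟨hne, d, hd, hdy⟩
    | some z =>
      dsimp only
      split_ifs with hz
      · simp only [List.mem_append, List.mem_singleton]
        constructor
        · rintro ((hy | rfl) | hy)
          · exact Or.inl hy
          · exact Or.inr ⟨hz.1, c, List.mem_cons_self .., h⟩
          · exact Or.inr ⟨hy.1, by obtain ⟨d, hd, hdy⟩ := hy.2; exact ⟨d, List.mem_cons_of_mem _ hd, hdy⟩⟩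
        · rintro (hy | ⟨hne, d, hd, hdy⟩)
          · exact Or.inl (Or.inl hy)
          · rcases List.mem_cons.mp hd with rfl | hd
            · rw [h] at hdy; exact Or.inl (Or.inr (Option.some_injective _ hdy).symm)
            · exact Or.inr ⟨hne, d, hd, hdy⟩
      · constructor
        · rintro (hy | hy)
          · exact Or.inl hy
          · exact Or.inr ⟨hy.1, by obtain ⟨d, hd, hdy⟩ := hy.2; exact ⟨d, List.mem_cons_of_mem _ hd, hdy⟩⟩
        · rintro (hy | ⟨hne, d, hd, hdy⟩)
          · exact Or.inl hy
          · rcases List.mem_cons.mp hd with rfl | hd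
            · rw [h] at hdy
              have hzy : z = y := Option.some_injective _ hdy
              subst hzy
              rcases not_and_or.mp hz with hz | hz
              · exact absurd hne (by simpa using hz)
              · exact Or.inl (by simpa using hz)
            · exact Or.inr ⟨hne, d, hd, hdy⟩

theorem mem_pvKeys (l : List (List (String × Int))) (y : String) :
    y ∈ pvKeys l ↔ y ≠ "2022" ∧ ∃ c ∈ l, pvYearStr c = some y := by
  simpa using mem_keysAux l [] y

theorem pvKeys_ne (l : List (List (String × Int))) {y : String} (h : y ∈ pvKeys l) : y ≠ "2022" :=
  ((mem_pvKeys l y).mp h).1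

theorem nodup_keysAux (l : List (List (String × Int))) :
    ∀ ks : List String, ks.Nodup →
      (l.foldl (fun ks child =>
        match pvYearStr child with
        | none => ks
        | some y => if y ≠ "2022" ∧ y ∉ ks then ks ++ [y] else ks) ks).Nodup := by
  induction l with
  | nil => intro ks h; simpa using h
  | cons c l ih =>
    intro ks h
    simp only [List.foldl_cons]
    apply ih
    cases hc : pvYearStr c with
    | none => exact h
    | some z =>
      dsimp only
      split_ifs with hz
      · exact List.Nodup.append h (List.nodup_singleton z) (by simpa using fun hmem => hz.2 hmem)
      · exact h

theorem nodup_pvKeys (l : List (List (String × Int))) : (pvKeys l).Nodup :=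
  nodup_keysAux l [] List.nodup_nil

theorem pvSum_eq_zero (l : List (List (String × Int))) (y : String)
    (h : ∀ c ∈ l, pvYearStr c ≠ some y) : pvSum l y = 0 := by
  induction l with
  | nil => rfl
  | cons c l ih =>
    have hc : pvYearStr c ≠ some y := h c (List.mem_cons_self ..)
    have : pvSum (c :: l) y = pvSum l y := by
      simp [pvSum, List.foldl_cons, hc]
    rw [this]
    exact ih (fun d hd => h d (List.mem_cons_of_mem _ hd))

-- main invariant: A's dict, as a list, is B's key list paired with B's sums
theorem main_inv (l : List (List (String × Int))) (hpre : ∀ c ∈ l, pvPreChild c = true) :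
    (l.foldl pvStepA PySem.Dict.empty).items =
      (pvKeys l).map (fun y => (y, pvSum l y)) := by
  induction l using List.reverseRecOn with
  | nil => rfl
  | append_singleton l c ih =>
    have hprel : ∀ d ∈ l, pvPreChild d = true :=
      fun d hd => hpre d (List.mem_append_left _ hd)
    have hpc : pvPreChild c = true := hpre c (List.mem_append_right _ (List.mem_singleton_self c))
    have ihit := ih hprel
    set d := l.foldl pvStepA PySem.Dict.empty with hd
    have hkeys : d.keys = pvKeys l := by
      simp only [PySem.Dict.keys, ihit, List.map_map]
      exact (List.map_congr_left (fun y _ => rfl)).trans (List.map_id _)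
    have hnd : d.keys.Nodup := by rw [hkeys]; exact nodup_pvKeys l
    rw [List.foldl_append]
    simp only [List.foldl_cons, List.foldl_nil]
    unfold pvPreChild at hpc
    cases hy : (PySem.Dict.ofList c).get? "Year" with
    | none => rw [hy] at hpc; exact absurd hpc (by simp)
    | some yv =>
      rw [hy] at hpc
      have hys : pvYearStr c = some (PySem.Int.toStr yv) := by simp [pvYearStr, hy]
      by_cases h2022 : PySem.Int.toStr yv = "2022"
      · -- skipped record: nothing changes
        have hstep : pvStepA d c = d := by
          unfold pvStepA; rw [hy]; simp [h2022]
        have hk : pvKeys (l ++ [c]) = pvKeys l := by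
          rw [pvKeys_append, hys]; simp [h2022]
        rw [hstep, hk, ihit]
        apply List.map_congr_left
        intro y' hy'
        have hne : pvYearStr c ≠ some y' := by
          rw [hys]
          intro h
          exact pvKeys_ne l hy' (by rw [← Option.some_injective _ h]; exact h2022)
        rw [pvSum_append, if_neg hne]
      · -- counted record
        have hnum : ((PySem.Dict.ofList c).get? "NumberOfPersons").isSome := by
          rcases Bool.or_eq_true_iff.mp hpc with h | h
          · exact absurd (by simpa using h) h2022
          · exact h
        obtain ⟨n, hn⟩ := Option.isSome_iff_exists.mp hnum
        have hsum_ne : ∀ y' ∈ pvKeys l, y' ≠ PySem.Int.toStr yv → pvSum (l ++ [c]) y' = pvSum l y' := by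
          intro y' _ hne
          rw [pvSum_append, if_neg (by rw [hys]; simpa using fun h => hne h.symm)]
        have hsum_y : pvSum (l ++ [c]) (PySem.Int.toStr yv) = pvSum l (PySem.Int.toStr yv) + n := by
          rw [pvSum_append, if_pos hys, hn]; rfl
        by_cases hmem : PySem.Int.toStr yv ∈ pvKeys l
        · -- existing key: overwrite in place
          have hget : d.get? (PySem.Int.toStr yv) = some (pvSum l (PySem.Int.toStr yv)) := by
            apply PySem.Dict.get?_of_mem_items d _ hnd
            rw [ihit]
            exact List.mem_map.mpr ⟨_, hmem, rfl⟩
          have hcont : d.contains (PySem.Int.toStr yv) = true := by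
            rw [PySem.Dict.contains_eq_isSome_get?, hget]; rfl
          have hstep : pvStepA d c = d.insert (PySem.Int.toStr yv) (pvSum l (PySem.Int.toStr yv) + n) := by
            unfold pvStepA; rw [hy]
            simp [h2022, hn, hget]
          have hk : pvKeys (l ++ [c]) = pvKeys l := by
            rw [pvKeys_append, hys]
            simp [hmem]
          rw [hstep, hk, PySem.Dict.items_insert_of_contains d _ hcont, ihit, List.map_map]
          apply List.map_congr_left
          intro y' hy'
          by_cases hne : y' = PySem.Int.toStr yv
          · subst hne
            simp [hsum_y]
          · simp only [Function.comp_apply]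
            rw [if_neg (by simpa using hne), hsum_ne y' hy' hne]
        · -- new key: append
          have hget : d.get? (PySem.Int.toStr yv) = none := by
            rw [PySem.Dict.get?_eq_none_iff_not_mem_keys, hkeys]; exact hmem
          have hcont : d.contains (PySem.Int.toStr yv) = false := by
            rw [PySem.Dict.contains_eq_isSome_get?, hget]; rfl
          have hstep : pvStepA d c = d.insert (PySem.Int.toStr yv) n := by
            unfold pvStepA; rw [hy]
            simp [h2022, hn, hget]
          have hk : pvKeys (l ++ [c]) = pvKeys l ++ [PySem.Int.toStr yv] := by
            rw [pvKeys_append, hys]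
            simp [h2022, hmem]
          have hzero : pvSum l (PySem.Int.toStr yv) = 0 := by
            apply pvSum_eq_zero
            intro e he hey
            exact hmem ((mem_pvKeys l _).mpr ⟨h2022, e, he, hey⟩)
          rw [hstep, hk, PySem.Dict.items_insert_of_not_contains d _ hcont, ihit, List.map_append]
          congr 1
          · apply List.map_congr_left
            intro y' hy'
            rw [hsum_ne y' hy' (fun h => hmem (h ▸ hy'))]
          · simp [hsum_y, hzero]

-- ===== VERDICT (by name: the statement is the Claim_ definition above) =====
theorem get_children_info_by_dict_spec : Claim_equal_get_children_info_by_dict := by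
  intro children _ hpre
  unfold Spec_get_children_info_by_dict get_children_info_by_dict get_children_info_by_dict_alt
  exact main_inv children hpre
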